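-- pv_equiv track=rewrite | github.com/ahb-sjsu/agi-hpc | benchmarks/executive_functions/executive_functions_benchmark_v1.py | build_composite_scenario
-- ===== SOURCE A (Python) =====
-- def base_scenario_text(s):
--     return f"Title: {s['title']}\n\n{s['text']}"
--
-- def build_composite_scenario(letters, bridge_text=None):
--     """Combine multiple Dear Abby letters into one composite scenario."""
--     if bridge_text is None:
--         bridge_text = "Meanwhile, in a related situation involving some of the same people..."
--     parts = []
--     for i, letter in enumerate(letters):
--         if i == 0:
--             parts.append(base_scenario_text(letter))
--         else:
--             parts.append(f"\n\n{bridge_text}\n\n{base_scenario_text(letter)}")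
--     return "".join(parts)
-- ===== SOURCE B (Python) =====
-- def base_scenario_text(s):
--     return f"Title: {s['title']}\n\n{s['text']}"
--
-- def build_composite_scenario(letters, bridge_text=None):
--     """Combine multiple Dear Abby letters into one composite scenario."""
--     if bridge_text is None:
--         bridge_text = "Meanwhile, in a related situation involving some of the same people..."
--
--     def go(ls):
--         if not ls:
--             return ""
--         if len(ls) == 1:
--             return base_scenario_text(ls[0])
--         return base_scenario_text(ls[0]) + "\n\n" + bridge_text + "\n\n" + go(ls[1:])
--
--     return go(letters)
-- ===== Notes on version B (the rewrite author's own statement) =====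
-- stated objective: alternative
-- what changed: Replaced the enumerate loop with its i==0 branch and the parts list + join by a direct recursive decomposition on the letter list that concatenates head text, bridge, and the recursively built rest.
import Mathlib
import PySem

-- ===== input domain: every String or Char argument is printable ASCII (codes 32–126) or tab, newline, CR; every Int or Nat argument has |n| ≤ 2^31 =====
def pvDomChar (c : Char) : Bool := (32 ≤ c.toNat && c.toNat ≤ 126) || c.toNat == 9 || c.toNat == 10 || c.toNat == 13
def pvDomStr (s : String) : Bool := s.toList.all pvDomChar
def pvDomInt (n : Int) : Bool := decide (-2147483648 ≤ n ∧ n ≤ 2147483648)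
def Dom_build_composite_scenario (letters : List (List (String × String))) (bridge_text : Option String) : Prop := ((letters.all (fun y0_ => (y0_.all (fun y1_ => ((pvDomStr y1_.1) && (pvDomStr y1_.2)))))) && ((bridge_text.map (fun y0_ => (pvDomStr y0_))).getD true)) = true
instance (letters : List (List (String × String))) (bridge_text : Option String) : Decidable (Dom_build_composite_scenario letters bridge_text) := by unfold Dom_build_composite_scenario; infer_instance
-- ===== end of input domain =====

-- B replaces A's enumerate loop, i==0 branch, parts list and "".join by a direct recursion on the letter list (alternative decomposition).
-- Shared helper of both Pythons: base_scenario_text(s) = f"Title: {s['title']}\n\n{s['text']}"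
-- (s['title'] / s['text'] raise KeyError when the key is missing — Pre_ excludes those letters; getD is exact under Pre_).

-- ===== PORT A =====
def pvBaseScenarioText (s : List (String × String)) : String :=
  "Title: " ++ (PySem.Dict.mk s).getD "title" "" ++ "\n\n" ++ (PySem.Dict.mk s).getD "text" ""

def build_composite_scenario (letters : List (List (String × String))) (bridge_text : Option String) : String :=
  let bt := bridge_text.getD "Meanwhile, in a related situation involving some of the same people..."
  let parts := (PySem.List.enumerate letters).foldl
    (fun parts p =>
      if p.1 = 0 then parts ++ [pvBaseScenarioText p.2]
      else parts ++ ["\n\n" ++ bt ++ "\n\n" ++ pvBaseScenarioText p.2]) []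
  PySem.Str.join "" parts

-- ===== PORT B =====
-- go(ls): "" for []; base(ls[0]) for a singleton; base(ls[0]) + "\n\n" + bt + "\n\n" + go(ls[1:]) otherwise.
def pvGoAlt (bt : String) : List (List (String × String)) → String
  | [] => ""
  | [l] => pvBaseScenarioText l
  | l :: l' :: rest =>
      pvBaseScenarioText l ++ "\n\n" ++ bt ++ "\n\n" ++ pvGoAlt bt (l' :: rest)

def build_composite_scenario_alt (letters : List (List (String × String))) (bridge_text : Option String) : String :=
  let bt := bridge_text.getD "Meanwhile, in a related situation involving some of the same people..."
  pvGoAlt bt letters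

-- ===== PRECONDITION & SPEC =====
-- Pre_: every letter dict has the keys "title" and "text"; otherwise Python A (and B) raise KeyError.
def Pre_build_composite_scenario (letters : List (List (String × String))) (bridge_text : Option String) : Prop :=
  letters.all (fun l => ((PySem.Dict.mk l).get? "title").isSome && ((PySem.Dict.mk l).get? "text").isSome) = true

instance (letters : List (List (String × String))) (bridge_text : Option String) : Decidable (Pre_build_composite_scenario letters bridge_text) := by unfold Pre_build_composite_scenario; infer_instance

def pvWitness_build_composite_scenario : (List (List (String × String))) × Option String :=
  ([[("title", "A"), ("text", "one")], [("title", "B"), ("text", "two")]], some "Later...")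

def Spec_build_composite_scenario (letters : List (List (String × String))) (bridge_text : Option String) (out : String) : Prop := out = build_composite_scenario_alt letters bridge_text
instance (letters : List (List (String × String))) (bridge_text : Option String) (out : String) : Decidable (Spec_build_composite_scenario letters bridge_text out) := by unfold Spec_build_composite_scenario; infer_instance

-- ===== CLAIM (what is proved, stated in full; the proofs are below) =====
def Claim_equal_build_composite_scenario : Prop := ∀ (letters : List (List (String × String))) (bridge_text : Option String), Dom_build_composite_scenario letters bridge_text → Pre_build_composite_scenario letters bridge_text → Spec_build_composite_scenario letters bridge_text (build_composite_scenario letters bridge_text)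

-- ===== LEMMAS AND PROOFS =====

-- A's loop over the tail (start index ≥ 1) appends one separator-prefixed part per letter.
theorem pv_loopA (bt : String) (rest : List (List (String × String))) (s : Int) (hs : 1 ≤ s)
    (acc : List String) :
    (PySem.List.enumerate rest s).foldl
      (fun parts p =>
        if p.1 = 0 then parts ++ [pvBaseScenarioText p.2]
        else parts ++ ["\n\n" ++ bt ++ "\n\n" ++ pvBaseScenarioText p.2]) acc
    = acc ++ rest.map (fun l => "\n\n" ++ bt ++ "\n\n" ++ pvBaseScenarioText l) := by
  rw [PySem.List.foldl_congr_mem _ _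
        (fun parts (p : Int × List (String × String)) =>
          parts ++ [("\n\n" ++ bt ++ "\n\n" ++ pvBaseScenarioText p.2 : String)]) acc ?_]
  · rw [PySem.List.foldl_append_singleton_eq_map]
    conv_rhs => rw [← PySem.List.map_snd_enumerate rest s, List.map_map]
    simp [Function.comp]
  · intro acc' p hp
    rw [PySem.List.mem_enumerate_iff] at hp
    obtain ⟨k, hk, rfl⟩ := hp
    have : ¬ (s + (k : Int) = 0) := by omega
    simp [this]

-- "".join with empty separator peels off the head element.
theorem pv_join_nil_cons (a : List Char) (t : List (List Char)) :
    PySem.Chars.join [] (a :: t) = a ++ PySem.Chars.join [] t := by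
  cases t with
  | nil => simp [PySem.Chars.join_singleton, PySem.Chars.join_nil]
  | cons b t' => rw [PySem.Chars.join_cons_cons]; simp

-- "".join of head :: separator-prefixed tail is B's recursion.
theorem pv_join_eq_go (bt : String) (l : List (String × String))
    (rest : List (List (String × String))) :
    PySem.Str.join "" (pvBaseScenarioText l ::
        rest.map (fun l' => "\n\n" ++ bt ++ "\n\n" ++ pvBaseScenarioText l'))
    = pvGoAlt bt (l :: rest) := by
  induction rest generalizing l with
  | nil =>
      apply String.toList_injective
      rw [PySem.Str.toList_join]
      simp [PySem.Chars.join_singleton, pvGoAlt]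
  | cons l' rest' ih =>
      apply String.toList_injective
      rw [PySem.Str.toList_join]
      have h := congrArg String.toList (ih l')
      rw [PySem.Str.toList_join] at h
      simp only [List.map_cons] at h ⊢
      have he : ("" : String).toList = [] := rfl
      rw [he] at h ⊢
      rw [pv_join_nil_cons, pv_join_nil_cons] 
      rw [pv_join_nil_cons] at h
      show _ = ((pvBaseScenarioText l ++ "\n\n" ++ bt ++ "\n\n" ++ pvGoAlt bt (l' :: rest')).toList)
      simp only [String.toList_append]
      rw [← h]
      simp [List.append_assoc]

-- ===== VERDICT (by name: the statement is the Claim_ definition above) =====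
theorem build_composite_scenario_spec : Claim_equal_build_composite_scenario := by
  intro letters bridge_text _ _
  unfold Spec_build_composite_scenario build_composite_scenario build_composite_scenario_alt
  cases letters with
  | nil => rfl
  | cons l rest =>
      simp only [PySem.List.enumerate_cons, List.foldl_cons, if_true, List.nil_append]
      rw [pv_loopA _ rest (0 + 1) (by omega)]
      exact pv_join_eq_go _ l rest
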